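-- pv_equiv track=rewrite | github.com/Dstauff24/fantasy-baseball-draft-assistant | backend/app/request_builders.py | _build_team_rosters
-- ===== SOURCE A (Python) =====
-- def _build_team_rosters(
--     drafted_player_ids: list[str],
--     user_roster_player_ids: list[str],
--     user_slot: int,
--     teams: int,
-- ) -> dict[int, list[str]]:
--     rosters: dict[int, list[str]] = {slot: [] for slot in range(1, teams + 1)}
--     used: set[str] = set()
--
--     for i, pid in enumerate(drafted_player_ids, start=1):
--         slot = _slot_for_pick(i, teams)
--         rosters[slot].append(pid)
--         used.add(pid)
--
--     for pid in user_roster_player_ids: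
--         if pid not in used:
--             rosters[user_slot].append(pid)
--             used.add(pid)
--
--     return rosters
--
-- def _slot_for_pick(pick_number: int, teams: int) -> int:
--     round_idx = (pick_number - 1) // teams
--     in_round = (pick_number - 1) % teams
--     return (in_round + 1) if round_idx % 2 == 0 else (teams - in_round)
-- ===== SOURCE B (Python) =====
-- def _build_team_rosters(
--     drafted_player_ids: list[str],
--     user_roster_player_ids: list[str],
--     user_slot: int,
--     teams: int,
-- ) -> dict[int, list[str]]:
--     rosters: dict[int, list[str]] = {slot: [] for slot in range(1, teams + 1)}
--
--     # distribute the draft round by round (snake order on odd round indices)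
--     remaining = drafted_player_ids
--     r = 0
--     while remaining:
--         chunk, remaining = remaining[:teams], remaining[teams:]
--         order = range(1, teams + 1) if r % 2 == 0 else range(teams, 0, -1)
--         for slot, pid in zip(order, chunk):
--             rosters[slot].append(pid)
--         r += 1
--
--     used = set(drafted_player_ids)
--     for pid in user_roster_player_ids:
--         if pid not in used:
--             rosters[user_slot].append(pid)
--             used.add(pid)
--
--     return rosters
-- ===== Notes on version B (the rewrite author's own statement) =====
-- stated objective: alternative
-- what changed: Replaces the per-pick closed-form slot arithmetic (_slot_for_pick with //, %) by an explicit round-by-round distribution: the drafted list is consumed in chunks of size `teams`, each chunk zipped with slot order 1..teams on even rounds and teams..1 on odd rounds.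
import Mathlib
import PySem

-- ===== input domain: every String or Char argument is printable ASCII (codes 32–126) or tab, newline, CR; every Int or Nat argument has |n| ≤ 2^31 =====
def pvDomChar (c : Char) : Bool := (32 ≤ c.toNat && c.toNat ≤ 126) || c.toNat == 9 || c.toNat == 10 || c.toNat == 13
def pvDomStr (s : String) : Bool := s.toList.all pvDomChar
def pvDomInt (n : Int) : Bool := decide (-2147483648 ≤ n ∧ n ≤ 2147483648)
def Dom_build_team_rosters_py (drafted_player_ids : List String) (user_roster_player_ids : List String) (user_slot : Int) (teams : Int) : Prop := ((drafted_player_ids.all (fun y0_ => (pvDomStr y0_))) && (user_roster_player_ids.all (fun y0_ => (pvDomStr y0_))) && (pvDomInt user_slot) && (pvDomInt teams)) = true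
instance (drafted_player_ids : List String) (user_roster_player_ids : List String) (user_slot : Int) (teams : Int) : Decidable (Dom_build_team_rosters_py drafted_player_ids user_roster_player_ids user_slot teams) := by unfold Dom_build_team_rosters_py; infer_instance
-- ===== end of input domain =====

-- B replaces the closed-form slot formula with a round-by-round (snake) distribution of the draft; equal return value, no side effects involved.

-- ===== PORT A =====
-- literal port of _slot_for_pick
def slot_for_pick_py (pick_number : Int) (teams : Int) : Int :=
  let round_idx := PySem.Int.floordiv (pick_number - 1) teams
  let in_round := PySem.Int.mod (pick_number - 1) teams
  if PySem.Int.mod round_idx 2 = 0 then in_round + 1 else teams - in_round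

-- rosters[slot].append(pid) is ported as Dict.modify slot [] (· ++ [pid]); exact whenever slot is a
-- key of rosters, which Pre_ guarantees at every such access (Python raises KeyError otherwise).
def build_team_rosters_py (drafted_player_ids : List String) (user_roster_player_ids : List String) (user_slot : Int) (teams : Int) : List (Int × List String) :=
  let rosters : PySem.Dict Int (List String) :=
    (PySem.List.pyRange 1 (teams + 1) 1).foldl (fun d s => d.insert s []) PySem.Dict.empty
  let used : PySem.Set String := PySem.Set.empty
  let st1 := (PySem.List.enumerate drafted_player_ids 1).foldl
    (fun (st : PySem.Dict Int (List String) × PySem.Set String) p =>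
      (st.1.modify (slot_for_pick_py p.1 teams) [] (· ++ [p.2]), PySem.Set.add st.2 p.2))
    (rosters, used)
  let st2 := user_roster_player_ids.foldl
    (fun (st : PySem.Dict Int (List String) × PySem.Set String) pid =>
      if PySem.Set.contains st.2 pid then st
      else (st.1.modify user_slot [] (· ++ [pid]), PySem.Set.add st.2 pid))
    st1
  st2.1.items

-- ===== PORT B =====
-- the while loop of Source B; fuel = initial list length only makes the recursion structural
-- (inside Pre_, teams ≥ 1 whenever remaining is nonempty, so the fuel is never exhausted)
def pvDistribute (fuel : Nat) (remaining : List String) (r : Int) (teams : Int)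
    (rosters : PySem.Dict Int (List String)) : PySem.Dict Int (List String) :=
  match fuel, remaining with
  | 0, _ => rosters
  | _, [] => rosters
  | fuel + 1, remaining =>
    let chunk := PySem.List.slice remaining none (some teams)
    let remaining' := PySem.List.slice remaining (some teams) none
    let order := if PySem.Int.mod r 2 = 0 then PySem.List.pyRange 1 (teams + 1) 1
                 else PySem.List.pyRange teams 0 (-1)
    let rosters' := (order.zip chunk).foldl (fun d p => d.modify p.1 [] (· ++ [p.2])) rosters
    pvDistribute fuel remaining' (r + 1) teams rosters'

def build_team_rosters_py_alt (drafted_player_ids : List String) (user_roster_player_ids : List String) (user_slot : Int) (teams : Int) : List (Int × List String) :=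
  let rosters : PySem.Dict Int (List String) :=
    (PySem.List.pyRange 1 (teams + 1) 1).foldl (fun d s => d.insert s []) PySem.Dict.empty
  let rosters := pvDistribute drafted_player_ids.length drafted_player_ids 0 teams rosters
  let used : PySem.Set String := PySem.Set.ofList drafted_player_ids
  let st2 := user_roster_player_ids.foldl
    (fun (st : PySem.Dict Int (List String) × PySem.Set String) pid =>
      if PySem.Set.contains st.2 pid then st
      else (st.1.modify user_slot [] (· ++ [pid]), PySem.Set.add st.2 pid))
    (rosters, used)
  st2.1.items

-- ===== PRECONDITION & SPEC =====
-- Pre_ excludes exactly the inputs where Python A raises: ZeroDivisionError/KeyError in the draft loop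
-- when drafted_player_ids is nonempty and teams < 1, and KeyError on rosters[user_slot] when some
-- user_roster pid is not among the drafted ids while user_slot is not a slot in 1..teams.
def Pre_build_team_rosters_py (drafted_player_ids : List String) (user_roster_player_ids : List String) (user_slot : Int) (teams : Int) : Prop :=
  (drafted_player_ids = [] ∨ 1 ≤ teams) ∧
  ((∀ pid ∈ user_roster_player_ids, pid ∈ drafted_player_ids) ∨ (1 ≤ user_slot ∧ user_slot ≤ teams))
instance (drafted_player_ids : List String) (user_roster_player_ids : List String) (user_slot : Int) (teams : Int) : Decidable (Pre_build_team_rosters_py drafted_player_ids user_roster_player_ids user_slot teams) := by unfold Pre_build_team_rosters_py; infer_instance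

def pvWitness_build_team_rosters_py : List String × List String × Int × Int :=
  (["a", "b", "c", "d", "e"], ["c", "x"], 2, 2)

def Spec_build_team_rosters_py (drafted_player_ids : List String) (user_roster_player_ids : List String) (user_slot : Int) (teams : Int) (out : List (Int × List String)) : Prop := out = build_team_rosters_py_alt drafted_player_ids user_roster_player_ids user_slot teams
instance (drafted_player_ids : List String) (user_roster_player_ids : List String) (user_slot : Int) (teams : Int) (out : List (Int × List String)) : Decidable (Spec_build_team_rosters_py drafted_player_ids user_roster_player_ids user_slot teams out) := by unfold Spec_build_team_rosters_py; infer_instance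

-- ===== CLAIM (what is proved, stated in full; the proofs are below) =====
def Claim_equal_build_team_rosters_py : Prop := ∀ (drafted_player_ids : List String) (user_roster_player_ids : List String) (user_slot : Int) (teams : Int), Dom_build_team_rosters_py drafted_player_ids user_roster_player_ids user_slot teams → Pre_build_team_rosters_py drafted_player_ids user_roster_player_ids user_slot teams → Spec_build_team_rosters_py drafted_player_ids user_roster_player_ids user_slot teams (build_team_rosters_py drafted_player_ids user_roster_player_ids user_slot teams)

-- ===== LEMMAS AND PROOFS =====


-- pvDistribute on an empty list returns the dict unchanged, for any fuel
theorem pvDistribute_nil (fuel : Nat) (r teams : Int) (d : PySem.Dict Int (List String)) :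
    pvDistribute fuel [] r teams d = d := by
  cases fuel <;> rfl

-- splitting A's pair-state fold into its two independent component folds
theorem phase1_split (teams : Int) (l : List (Int × String))
    (d : PySem.Dict Int (List String)) (u : PySem.Set String) :
    l.foldl (fun (st : PySem.Dict Int (List String) × PySem.Set String) p =>
      (st.1.modify (slot_for_pick_py p.1 teams) [] (· ++ [p.2]), PySem.Set.add st.2 p.2)) (d, u)
    = (l.foldl (fun d p => d.modify (slot_for_pick_py p.1 teams) [] (· ++ [p.2])) d,
       l.foldl (fun u p => PySem.Set.add u p.2) u) := by
  induction l generalizing d u with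
  | nil => rfl
  | cons p l ih => simp [List.foldl_cons, ih]

-- the set built by A's first loop is set(drafted_player_ids)
theorem phase1_set (xs : List String) :
    (PySem.List.enumerate xs 1).foldl (fun u p => PySem.Set.add u p.2) PySem.Set.empty
    = PySem.Set.ofList xs := by
  have h1 : (PySem.List.enumerate xs 1).foldl (fun u p => PySem.Set.add u p.2) PySem.Set.empty
      = ((PySem.List.enumerate xs 1).map (·.2)).foldl PySem.Set.add PySem.Set.empty := by
    rw [List.foldl_map]
  rw [h1, PySem.List.map_snd_enumerate, PySem.Set.ofList_eq_foldl]
  rfl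

-- the closed-form slot of pick r*teams+1+k is position k of round r's slot order
theorem slot_value (teams r k : Int) (ht : 1 ≤ teams) (hk0 : 0 ≤ k) (hk : k < teams) :
    slot_for_pick_py (r * teams + 1 + k) teams
    = if PySem.Int.mod r 2 = 0 then k + 1 else teams - k := by
  have hfd : PySem.Int.floordiv (r * teams + 1 + k - 1) teams = r := by
    rw [PySem.Int.floordiv_eq_iff_of_pos (by omega)]
    constructor <;> nlinarith
  have hmod : PySem.Int.mod (r * teams + 1 + k - 1) teams = k := by
    have := PySem.Int.floordiv_mul_add_mod (r * teams + 1 + k - 1) teams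
    rw [hfd] at this; linarith
  simp only [slot_for_pick_py, hfd, hmod]

-- a round's picks, mapped through the closed-form slot, are exactly zip(order, chunk)
theorem chunk_zip (teams r : Int) (chunk : List String) (ht : 1 ≤ teams)
    (hlen : chunk.length ≤ teams.toNat) :
    (PySem.List.enumerate chunk (r * teams + 1)).map (fun p => (slot_for_pick_py p.1 teams, p.2))
    = ((if PySem.Int.mod r 2 = 0 then PySem.List.pyRange 1 (teams + 1) 1
        else PySem.List.pyRange teams 0 (-1)).zip chunk) := by
  have horder : (if PySem.Int.mod r 2 = 0 then PySem.List.pyRange 1 (teams + 1) 1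
      else PySem.List.pyRange teams 0 (-1)).length = teams.toNat := by
    split
    · rw [PySem.List.length_pyRange_one]; omega
    · rw [PySem.List.length_pyRange_neg_one]; omega
  apply List.ext_getElem
  · rw [List.length_map, PySem.List.length_enumerate, List.length_zip, horder]; omega
  · intro k h1 h2
    have hk : k < chunk.length := by
      rw [List.length_map, PySem.List.length_enumerate] at h1; exact h1
    have hkt : (k : Int) < teams := by omega
    have hfst : (if PySem.Int.mod r 2 = 0 then PySem.List.pyRange 1 (teams + 1) 1
        else PySem.List.pyRange teams 0 (-1))[k]'(by rw [horder]; omega)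
        = (if PySem.Int.mod r 2 = 0 then (k : Int) + 1 else teams - (k : Int)) := by
      split
      · rw [PySem.List.getElem_pyRange_one]; omega
      · rw [List.getElem_of_eq (PySem.List.pyRange_neg_one teams 0), List.getElem_map,
          List.getElem_range]
    rw [List.getElem_map, PySem.List.getElem_enumerate, List.getElem_zip, Prod.mk.injEq]
    refine ⟨?_, rfl⟩
    rw [slot_value teams r k ht (by positivity) hkt, hfst]

-- MAIN: the round-by-round distribution equals A's per-pick fold (round r starts at pick r*teams+1)
theorem distribute_eq (teams : Int) (ht : 1 ≤ teams) :
    ∀ (fuel : Nat) (rest : List String) (r : Int) (d : PySem.Dict Int (List String)),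
      rest.length ≤ fuel →
      pvDistribute fuel rest r teams d
      = (PySem.List.enumerate rest (r * teams + 1)).foldl
          (fun d p => d.modify (slot_for_pick_py p.1 teams) [] (· ++ [p.2])) d := by
  intro fuel
  induction fuel with
  | zero =>
    intro rest r d hlen
    have : rest = [] := List.eq_nil_of_length_eq_zero (by omega)
    subst this
    rfl
  | succ fuel ih =>
    intro rest r d hlen
    cases rest with
    | nil => rfl
    | cons x xs =>
      have h0t : (0 : Int) ≤ teams := by omega
      have hstep : pvDistribute (fuel + 1) (x :: xs) r teams d
          = pvDistribute fuel ((x :: xs).drop teams.toNat) (r + 1) teams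
              (((if PySem.Int.mod r 2 = 0 then PySem.List.pyRange 1 (teams + 1) 1
                  else PySem.List.pyRange teams 0 (-1)).zip ((x :: xs).take teams.toNat)).foldl
                (fun d p => d.modify p.1 [] (· ++ [p.2])) d) := by
        show pvDistribute fuel (PySem.List.slice (x :: xs) (some teams) none) (r + 1) teams _ = _
        rw [PySem.List.slice_to _ h0t, PySem.List.slice_from _ h0t]
      rw [hstep]
      set rest := x :: xs with hrest
      have hsplit : rest = rest.take teams.toNat ++ rest.drop teams.toNat :=
        (List.take_append_drop _ _).symm
      conv_rhs => rw [hsplit]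
      rw [PySem.List.enumerate_append, List.foldl_append]
      have hinner : ∀ d0 : PySem.Dict Int (List String),
          (PySem.List.enumerate (rest.take teams.toNat) (r * teams + 1)).foldl
            (fun d p => d.modify (slot_for_pick_py p.1 teams) [] (· ++ [p.2])) d0
          = ((if PySem.Int.mod r 2 = 0 then PySem.List.pyRange 1 (teams + 1) 1
              else PySem.List.pyRange teams 0 (-1)).zip (rest.take teams.toNat)).foldl
              (fun d p => d.modify p.1 [] (· ++ [p.2])) d0 := by
        intro d0
        rw [← chunk_zip teams r _ ht (by simp), List.foldl_map]
      rw [hinner]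
      by_cases hdrop : rest.drop teams.toNat = []
      · rw [hdrop, pvDistribute_nil]
        rfl
      · have hlong : teams.toNat ≤ rest.length := by
          by_contra h
          exact hdrop (List.drop_eq_nil_of_le (by omega))
        have htake : (rest.take teams.toNat).length = teams.toNat := by
          rw [List.length_take]; omega
        rw [ih _ (r + 1) _ (by rw [List.length_drop]; omega)]
        congr 1
        rw [htake, Int.toNat_of_nonneg h0t]
        ring_nf

-- both first phases (dict and set components) coincide under Pre_
theorem phase1_eq (drafted : List String) (teams : Int)
    (hpre : drafted = [] ∨ 1 ≤ teams) (seed : PySem.Dict Int (List String)) :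
    (PySem.List.enumerate drafted 1).foldl
      (fun d p => d.modify (slot_for_pick_py p.1 teams) [] (· ++ [p.2])) seed
    = pvDistribute drafted.length drafted 0 teams seed := by
  rcases hpre with h | h
  · subst h
    rfl
  · rw [distribute_eq teams h drafted.length drafted 0 seed (le_refl _)]
    norm_num

-- ===== VERDICT (by name: the statement is the Claim_ definition above) =====
theorem build_team_rosters_py_spec : Claim_equal_build_team_rosters_py := by
  intro drafted user us teams _ hpre
  unfold Spec_build_team_rosters_py build_team_rosters_py build_team_rosters_py_alt
  dsimp only
  rw [phase1_split, phase1_set, phase1_eq drafted teams hpre.1]
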